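-- pv_equiv track=rewrite | github.com/Rhiba/aoc2023 | 12/1.py | strip_ends
-- ===== SOURCE A (Python) =====
-- def strip_ends(pattern, groups):
--
--     changed = True
--
--     while changed:
--         changed = False
--
--         if pattern == '' or groups == []:
--             break
--
--         first_group = groups[0]
--         last_group = groups[-1]
--
--         if pattern[0] == '.':
--             pattern = pattern[1:]
--             changed = True
--             continue
--
--         if pattern[-1] == '.':
--             pattern = pattern[:-1]
--             changed = True
--             continue
--
--         '''
--         if pattern[0] == '#' and pattern[:first_group+1].count('#') == first_group:
--             pattern = pattern[first_group+1:]
--             groups = groups[1:] if len(groups) > 1 else []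
--             changed = True
--         '''
--
--         if pattern[0] == '#' and all([x=='?' or x=='#' for x in pattern[1:first_group]]):
--             pattern = pattern[first_group+1:]
--             groups = groups[1:] if len(groups) > 1 else []
--             changed = True
--
--         if pattern == '' or groups == []:
--             break
--
--         '''
--         if pattern[-1] == '#' and pattern[-last_group-1:].count('#') == last_group:
--             pattern = pattern[:-last_group-1]
--             groups = groups[:-1] if len(groups) > 1 else []
--             changed = True
--         '''
--
--         if pattern[-1] == '#' and all([x=='?' or x=='#' for x in pattern[-last_group:]]):
--             pattern = pattern[:-last_group-1]
--             groups = groups[:-1] if len(groups) > 1 else []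
--             changed = True
--
--         if pattern == '' or groups == []:
--             break
--
--         '''
--         if not all([x=='?' or x=='#' for x in pattern[:groups[0]]]):
--             first_idx = pattern.index('.')
--             pattern = pattern[first_idx+1:]
--             changed = True
--         '''
--
--
--
--     return pattern, groups
-- ===== SOURCE B (Python) =====
-- def strip_ends(pattern, groups):
--     # Two pointers over the original pattern and group list: lo..hi is the live
--     # window of the pattern, i..j the live window of groups; nothing is copied
--     # until the final result is sliced out once.
--     lo, hi = 0, len(pattern)
--     i, j = 0, len(groups)
--     changed = True
--     while changed:
--         changed = False
--         if lo >= hi or i >= j: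
--             break
--         if pattern[lo] == '.':
--             lo += 1
--             changed = True
--             continue
--         if pattern[hi - 1] == '.':
--             hi -= 1
--             changed = True
--             continue
--         g0 = groups[i]
--         if pattern[lo] == '#' and all(c in '?#' for c in pattern[lo + 1:min(lo + g0, hi)]):
--             lo = min(lo + g0 + 1, hi)
--             i += 1
--             changed = True
--         if lo >= hi or i >= j:
--             break
--         gl = groups[j - 1]
--         if pattern[hi - 1] == '#' and all(c in '?#' for c in pattern[max(hi - gl, lo):hi]):
--             hi = max(hi - gl - 1, lo)
--             j -= 1
--             changed = True
--     return pattern[lo:hi], groups[i:j]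
-- ===== Notes on version B (the rewrite author's own statement) =====
-- stated objective: alternative
-- what changed: B keeps two index pairs (lo,hi)/(i,j) into the original pattern and group list and moves them, instead of A's rebuilding pattern and groups by slicing on every loop iteration; Pre_ excludes only inputs where a group value <= 0 can actually be read (some group <= 0 and the dot-trimmed pattern has a '#' end), on which A still returns but via Python's zero/negative slice-bound accidents (pattern[-0:] is the whole string) that no caller of this run-length helper relies on.
-- outside the precondition, e.g. on strip_ends('#.#', [5, 0]): A returns ('#.#', [5, 0]), B returns ('', []); on strip_ends('#.#', [1, -1]): A returns ('', []), B returns ('#', [])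
import Mathlib
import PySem

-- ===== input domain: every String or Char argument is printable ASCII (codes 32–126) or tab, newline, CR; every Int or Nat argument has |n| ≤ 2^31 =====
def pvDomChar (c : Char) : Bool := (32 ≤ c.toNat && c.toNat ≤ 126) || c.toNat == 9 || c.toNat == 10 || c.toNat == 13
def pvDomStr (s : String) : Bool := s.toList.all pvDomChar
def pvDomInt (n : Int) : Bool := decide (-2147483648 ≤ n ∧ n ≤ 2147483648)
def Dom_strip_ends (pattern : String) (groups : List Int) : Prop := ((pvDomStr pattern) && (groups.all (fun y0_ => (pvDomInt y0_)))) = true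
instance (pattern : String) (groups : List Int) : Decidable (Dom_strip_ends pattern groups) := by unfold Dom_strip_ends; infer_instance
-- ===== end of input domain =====

-- B replaces A's per-iteration slice copies of pattern/groups by two index pairs
-- moved over the original data; Pre_ restricts to positive group lengths
-- (objective: alternative traversal of the same data).


-- ===== PORT A =====
-- A's `while changed` loop on (pattern, groups).  pattern[0] / pattern[-1] /
-- groups[0] / groups[-1] are read behind non-emptiness guards, so pyGetD with an
-- arbitrary default is exact there.  `changed` is materialised as the two hit
-- conditions, written out where Python reads the flag.  The fuel argument is a
-- totality guard only: every iteration that changes the state shrinks it.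
def aLoopF : Nat → List Char → List Int → List Char × List Int
  | 0, p, g => (p, g)          -- fuel exhausted: totality guard only, never reached
  | f + 1, p, g =>
    if p = [] ∨ g = [] then (p, g)
    else
      let fg := PySem.List.pyGetD g 0 0          -- first_group = groups[0]
      let lg := PySem.List.pyGetD g (-1) 0       -- last_group = groups[-1]
      if PySem.List.pyGetD p 0 ' ' = '.' then
        aLoopF f (PySem.List.slice p (some 1) none) g          -- pattern = pattern[1:]
      else if PySem.List.pyGetD p (-1) ' ' = '.' then
        aLoopF f (PySem.List.slice p none (some (-1))) g       -- pattern = pattern[:-1]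
      else
        let hit1 := PySem.List.pyGetD p 0 ' ' == '#' &&
          (PySem.List.slice p (some 1) (some fg)).all (fun x => x == '?' || x == '#')
        let p1 := if hit1 then PySem.List.slice p (some (fg + 1)) none else p
        let g1 := if hit1 then (if 1 < g.length then PySem.List.slice g (some 1) none else []) else g
        if p1 = [] ∨ g1 = [] then (p1, g1)
        else
          let hit2 := PySem.List.pyGetD p1 (-1) ' ' == '#' &&
            (PySem.List.slice p1 (some (-lg)) none).all (fun x => x == '?' || x == '#')
          let p2 := if hit2 then PySem.List.slice p1 none (some (-lg - 1)) else p1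
          let g2 := if hit2 then (if 1 < g1.length then PySem.List.slice g1 none (some (-1)) else []) else g1
          if p2 = [] ∨ g2 = [] then (p2, g2)
          else if hit1 || hit2 then aLoopF f p2 g2 else (p2, g2)

def strip_ends (pattern : String) (groups : List Int) : String × List Int :=
  let cs := pattern.toList
  let r := aLoopF (cs.length + groups.length + 1) cs groups
  (String.ofList r.1, r.2)

-- ===== PORT B =====
-- Source B's while-loop over the index state (lo, hi, i, j); pattern[lo] /
-- pattern[hi-1] / groups[i] / groups[j-1] are guarded in range, and the fuel
-- argument is a totality guard only.
def bLoopF (cs : List Char) (gs : List Int) : Nat → Int → Int → Int → Int → (Int × Int) × (Int × Int)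
  | 0, lo, hi, i, j => ((lo, hi), (i, j))      -- fuel exhausted: totality guard only
  | f + 1, lo, hi, i, j =>
    if hi ≤ lo ∨ j ≤ i then ((lo, hi), (i, j))
    else if PySem.List.pyGetD cs lo ' ' = '.' then bLoopF cs gs f (lo + 1) hi i j
    else if PySem.List.pyGetD cs (hi - 1) ' ' = '.' then bLoopF cs gs f lo (hi - 1) i j
    else
      let g0 := PySem.List.pyGetD gs i 0
      let hit1 := PySem.List.pyGetD cs lo ' ' == '#' &&
        (PySem.List.slice cs (some (lo + 1)) (some (min (lo + g0) hi))).all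
          (fun c => ['?', '#'].contains c)
      let lo1 := if hit1 then min (lo + g0 + 1) hi else lo
      let i1 := if hit1 then i + 1 else i
      if hi ≤ lo1 ∨ j ≤ i1 then ((lo1, hi), (i1, j))
      else
        let gl := PySem.List.pyGetD gs (j - 1) 0
        let hit2 := PySem.List.pyGetD cs (hi - 1) ' ' == '#' &&
          (PySem.List.slice cs (some (max (hi - gl) lo1)) (some hi)).all
            (fun c => ['?', '#'].contains c)
        let hi2 := if hit2 then max (hi - gl - 1) lo1 else hi
        let j2 := if hit2 then j - 1 else j
        if hit1 || hit2 then bLoopF cs gs f lo1 hi2 i1 j2 else ((lo1, hi2), (i1, j2))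

def strip_ends_alt (pattern : String) (groups : List Int) : String × List Int :=
  let cs := pattern.toList
  let r := bLoopF cs groups (cs.length + groups.length + 1) 0 cs.length 0 groups.length
  (String.ofList (PySem.List.slice cs (some r.1.1) (some r.1.2)),
   PySem.List.slice groups (some r.2.1) (some r.2.2))

-- ===== PRECONDITION & SPEC =====
-- Groups are run lengths, so Pre_ admits inputs whose group values are all
-- positive, and also any input whose group values are never read because the
-- dot-trimmed pattern has no '#' at either end; what it excludes are inputs on
-- which a value ≤ 0 is actually used, where A still returns but via Python's
-- zero/negative slice bounds (pattern[-0:] is the whole string, pattern[1:-2]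
-- counts from the end), an accidental behaviour no caller of this run-length
-- helper relies on.
def Pre_strip_ends (pattern : String) (groups : List Int) : Prop :=
  (∀ g ∈ groups, 1 ≤ g) ∨
  (((pattern.toList.dropWhile (fun c => c == '.')).head? ≠ some '#') ∧
   ((pattern.toList.reverse.dropWhile (fun c => c == '.')).head? ≠ some '#'))
instance (pattern : String) (groups : List Int) : Decidable (Pre_strip_ends pattern groups) := by unfold Pre_strip_ends; infer_instance
def pvWitness_strip_ends : String × List Int := ("?#.#", [2, 1])

def Spec_strip_ends (pattern : String) (groups : List Int) (out : String × List Int) : Prop := out = strip_ends_alt pattern groups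
instance (pattern : String) (groups : List Int) (out : String × List Int) : Decidable (Spec_strip_ends pattern groups out) := by unfold Spec_strip_ends; infer_instance

-- ===== CLAIM (what is proved, stated in full; the proofs are below) =====
def Claim_equal_strip_ends : Prop := ∀ (pattern : String) (groups : List Int), Dom_strip_ends pattern groups → Pre_strip_ends pattern groups → Spec_strip_ends pattern groups (strip_ends pattern groups)

-- ===== LEMMAS AND PROOFS =====

-- the window cs[lo:hi] B's indices denote
def pvWin {α : Type} (xs : List α) (lo hi : Nat) : List α := (xs.drop lo).take (hi - lo)

theorem pvWin_len {α : Type} (xs : List α) (lo hi : Nat) (h2 : hi ≤ xs.length) :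
    (pvWin xs lo hi).length = hi - lo := by
  simp [pvWin]; omega

theorem pvWin_nil {α : Type} (xs : List α) (lo hi : Nat) (h1 : lo ≤ hi) (h2 : hi ≤ xs.length) :
    pvWin xs lo hi = [] ↔ lo = hi := by
  rw [← List.length_eq_zero_iff, pvWin_len xs lo hi h2]
  omega

theorem pvWin_getElem? {α : Type} (xs : List α) (lo hi k : Nat) (hk : k < hi - lo) :
    (pvWin xs lo hi)[k]? = xs[lo + k]? := by
  unfold pvWin
  rw [List.getElem?_take, if_pos hk, List.getElem?_drop]

theorem pvWin_pyGetD0 {α : Type} [Inhabited α] (xs : List α) (lo hi : Nat) (d : α)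
    (h : lo < hi) :
    PySem.List.pyGetD (pvWin xs lo hi) 0 d = xs.getD lo d := by
  unfold PySem.List.pyGetD
  rw [PySem.List.pyGet?_of_nonneg _ (by norm_num)]
  show ((pvWin xs lo hi)[(0 : Nat)]?).getD d = _
  rw [pvWin_getElem? xs lo hi 0 (by omega), List.getD_eq_getElem?_getD]
  simp

theorem pvWin_pyGetDlast {α : Type} [Inhabited α] (xs : List α) (lo hi : Nat) (d : α)
    (h : lo < hi) (h2 : hi ≤ xs.length) :
    PySem.List.pyGetD (pvWin xs lo hi) (-1) d = xs.getD (hi - 1) d := by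
  unfold PySem.List.pyGetD
  rw [PySem.List.pyGet?_neg_one, List.getLast?_eq_getElem?, pvWin_len xs lo hi h2]
  rw [pvWin_getElem? xs lo hi (hi - lo - 1) (by omega), List.getD_eq_getElem?_getD]
  congr 2
  omega

theorem pvWin_drop {α : Type} (xs : List α) (lo hi s : Nat) :
    (pvWin xs lo hi).drop s = pvWin xs (lo + s) hi := by
  unfold pvWin
  rw [List.drop_take, List.drop_drop]
  congr 1
  omega

theorem pvWin_take' {α : Type} (xs : List α) (lo hi t : Nat) :
    (pvWin xs lo hi).take t = pvWin xs lo (min (lo + t) hi) := by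
  unfold pvWin
  rw [List.take_take]
  congr 1
  omega

theorem pvSliceTo {α : Type} (xs : List α) (b : Int) :
    PySem.List.slice xs none (some b) = xs.take (PySem.List.clampIdx xs.length b) := by
  simp [PySem.List.slice]

-- bLoopF returns its state unchanged once the window is exhausted
theorem pv_bstop (cs : List Char) (gs : List Int) (f : Nat) (lo hi i j : Int)
    (h : hi ≤ lo ∨ j ≤ i) : bLoopF cs gs f lo hi i j = ((lo, hi), (i, j)) := by
  cases f with
  | zero => rfl
  | succ f => simp only [bLoopF, if_pos h]

-- the two membership tests are the same Bool function
theorem pvQH : (fun c => (['?', '#'].contains c)) = (fun x : Char => x == '?' || x == '#') := by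
  funext c
  by_cases h1 : c = '?' <;> by_cases h2 : c = '#' <;> simp [h1, h2]

theorem pv_sim (cs : List Char) (gs : List Int) (hg : ∀ g ∈ gs, 1 ≤ g) :
    ∀ (f lo hi i j : Nat), lo ≤ hi → hi ≤ cs.length → i ≤ j → j ≤ gs.length →
      ∃ lo' hi' i' j' : Nat,
        bLoopF cs gs f lo hi i j = (((lo' : Int), (hi' : Int)), ((i' : Int), (j' : Int))) ∧
        lo' ≤ hi' ∧ hi' ≤ cs.length ∧ i' ≤ j' ∧ j' ≤ gs.length ∧
        aLoopF f (pvWin cs lo hi) (pvWin gs i j) = (pvWin cs lo' hi', pvWin gs i' j') := by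
  intro f
  induction f with
  | zero =>
    intro lo hi i j h1 h2 h3 h4
    exact ⟨lo, hi, i, j, rfl, h1, h2, h3, h4, rfl⟩
  | succ f ih =>
    intro lo hi i j h1 h2 h3 h4
    by_cases hG : lo = hi ∨ i = j
    · have hBG : (hi : Int) ≤ (lo : Int) ∨ (j : Int) ≤ (i : Int) := by omega
      have hA : pvWin cs lo hi = [] ∨ pvWin gs i j = [] := by
        rcases hG with h | h
        · exact Or.inl ((pvWin_nil cs lo hi h1 h2).mpr h)
        · exact Or.inr ((pvWin_nil gs i j h3 h4).mpr h)
      refine ⟨lo, hi, i, j, ?_, h1, h2, h3, h4, ?_⟩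
      · simp only [bLoopF, if_pos hBG]
      · simp only [aLoopF, if_pos hA]
    · have hlo : lo < hi := by omega
      have hij : i < j := by omega
      have hBG : ¬((hi : Int) ≤ (lo : Int) ∨ (j : Int) ≤ (i : Int)) := by omega
      have hA : ¬(pvWin cs lo hi = [] ∨ pvWin gs i j = []) := by
        rw [pvWin_nil cs lo hi h1 h2, pvWin_nil gs i j h3 h4]
        omega
      have e0 := pvWin_pyGetD0 cs lo hi ' ' hlo
      have e1 := pvWin_pyGetDlast cs lo hi ' ' hlo h2
      have e2 := pvWin_pyGetD0 gs i j 0 hij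
      have e3 := pvWin_pyGetDlast gs i j 0 hij h4
      have eb0 : PySem.List.pyGetD cs (lo : Int) ' ' = cs.getD lo ' ' := by simp
      have eb1 : PySem.List.pyGetD cs ((hi : Int) - 1) ' ' = cs.getD (hi - 1) ' ' := by
        rw [show ((hi : Int) - 1) = ((hi - 1 : Nat) : Int) by omega]
        simp
      have eb2 : PySem.List.pyGetD gs (i : Int) 0 = gs.getD i 0 := by simp
      have eb3 : PySem.List.pyGetD gs ((j : Int) - 1) 0 = gs.getD (j - 1) 0 := by
        rw [show ((j : Int) - 1) = ((j - 1 : Nat) : Int) by omega]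
        simp
      simp only [aLoopF, bLoopF, if_neg hA, if_neg hBG, e0, e1, e2, e3, eb0, eb1, eb2, eb3]
      by_cases hd1 : cs.getD lo ' ' = '.'
      · simp only [if_pos hd1]
        have hsl : PySem.List.slice (pvWin cs lo hi) (some 1) none = pvWin cs (lo + 1) hi := by
          rw [PySem.List.slice_from_one, ← List.drop_one, pvWin_drop]
        rw [hsl, show ((lo : Int) + 1) = ((lo + 1 : Nat) : Int) by omega]
        exact ih (lo + 1) hi i j (by omega) h2 h3 h4
      · by_cases hd2 : cs.getD (hi - 1) ' ' = '.'
        · simp only [if_neg hd1, if_pos hd2]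
          have hsl : PySem.List.slice (pvWin cs lo hi) none (some (-1)) = pvWin cs lo (hi - 1) := by
            rw [PySem.List.slice_to_neg_one, List.dropLast_eq_take, pvWin_len cs lo hi h2, pvWin_take']
            congr 1
            omega
          rw [hsl, show ((hi : Int) - 1) = ((hi - 1 : Nat) : Int) by omega]
          exact ih lo (hi - 1) i j (by omega) (by omega) h3 h4
        · simp only [if_neg hd1, if_neg hd2]
          have hmem : gs.getD i 0 ∈ gs := by
            rw [List.getD_eq_getElem?_getD, List.getElem?_eq_getElem (show i < gs.length by omega)]
            exact List.getElem_mem _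
          obtain ⟨g0n, hg0, hg0p⟩ : ∃ g0n : Nat, gs.getD i 0 = (g0n : Int) ∧ 1 ≤ g0n := by
            have h := hg _ hmem
            exact ⟨(gs.getD i 0).toNat, by omega, by omega⟩
          have hmem' : gs.getD (j - 1) 0 ∈ gs := by
            rw [List.getD_eq_getElem?_getD, List.getElem?_eq_getElem (show j - 1 < gs.length by omega)]
            exact List.getElem_mem _
          obtain ⟨gln, hgl, hglp⟩ : ∃ gln : Nat, gs.getD (j - 1) 0 = (gln : Int) ∧ 1 ≤ gln := by
            have h := hg _ hmem'
            exact ⟨(gs.getD (j - 1) 0).toNat, by omega, by omega⟩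
          have eSA1 : PySem.List.slice (pvWin cs lo hi) (some 1) (some (gs.getD i 0)) = pvWin cs (lo + 1) (min (lo + g0n) hi) := by
            rw [hg0, show (1 : Int) = ((1 : Nat) : Int) by norm_num, PySem.List.slice_natCast, pvWin_drop, pvWin_take']
            congr 1
            omega
          have eSB1 : PySem.List.slice cs (some ((lo : Int) + 1)) (some (min ((lo : Int) + gs.getD i 0) (hi : Int))) = pvWin cs (lo + 1) (min (lo + g0n) hi) := by
            rw [hg0, show ((lo : Int) + 1) = ((lo + 1 : Nat) : Int) by omega,
                show min ((lo : Int) + (g0n : Int)) (hi : Int) = ((min (lo + g0n) hi : Nat) : Int) by omega,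
                PySem.List.slice_natCast]
            rfl
          have eUA1 : PySem.List.slice (pvWin cs lo hi) (some (gs.getD i 0 + 1)) none = pvWin cs (min (lo + g0n + 1) hi) hi := by
            rw [hg0, show ((g0n : Int) + 1) = ((g0n + 1 : Nat) : Int) by omega, PySem.List.slice_some_none, PySem.List.clampIdx_natCast, pvWin_len cs lo hi h2, pvWin_drop]
            congr 1
            omega
          have eUB1 : min ((lo : Int) + gs.getD i 0 + 1) (hi : Int) = ((min (lo + g0n + 1) hi : Nat) : Int) := by
            rw [hg0]
            omega
          have eIB1 : (i : Int) + 1 = ((i + 1 : Nat) : Int) := by omega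
          have eGA1 : (if 1 < (pvWin gs i j).length then PySem.List.slice (pvWin gs i j) (some 1) none else []) = pvWin gs (i + 1) j := by
            rw [pvWin_len gs i j h4]
            by_cases hji : 1 < j - i
            · rw [if_pos hji, PySem.List.slice_from_one, ← List.drop_one, pvWin_drop]
            · rw [if_neg hji]
              unfold pvWin
              rw [show j - (i + 1) = 0 by omega]
              simp
          simp only [pvQH, eSA1, eSB1, eUA1, eUB1, eIB1, eGA1]
          by_cases hc1 : (cs.getD lo ' ' == '#' && (pvWin cs (lo + 1) (min (lo + g0n) hi)).all fun x => x == '?' || x == '#') = true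
          · simp only [hc1, Bool.true_or, reduceIte]
            have hmidA : (pvWin cs (min (lo + g0n + 1) hi) hi = [] ∨ pvWin gs (i + 1) j = []) ↔ ((min (lo + g0n + 1) hi) = hi ∨ (i + 1) = j) := by
              rw [pvWin_nil cs (min (lo + g0n + 1) hi) hi (by omega) h2, pvWin_nil gs (i + 1) j (by omega) h4]
            by_cases hmid : (min (lo + g0n + 1) hi) = hi ∨ (i + 1) = j
            · have hmB : (hi : Int) ≤ ((min (lo + g0n + 1) hi : Nat) : Int) ∨ (j : Int) ≤ ((i + 1 : Nat) : Int) := by omega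
              rw [if_pos hmB, if_pos (hmidA.mpr hmid)]
              exact ⟨min (lo + g0n + 1) hi, hi, i + 1, j, rfl, by omega, h2, by omega, h4, rfl⟩
            · have hmB : ¬((hi : Int) ≤ ((min (lo + g0n + 1) hi : Nat) : Int) ∨ (j : Int) ≤ ((i + 1 : Nat) : Int)) := by omega
              rw [if_neg hmB, if_neg (fun hcon => hmid (hmidA.mp hcon))]
              have e1' := pvWin_pyGetDlast cs (min (lo + g0n + 1) hi) hi ' ' (by omega) h2
              have eSA2 : PySem.List.slice (pvWin cs (min (lo + g0n + 1) hi) hi) (some (-gs.getD (j - 1) 0)) none = pvWin cs (max (hi - gln) (min (lo + g0n + 1) hi)) hi := by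
                rw [hgl, PySem.List.slice_some_none, pvWin_len cs (min (lo + g0n + 1) hi) hi h2, PySem.List.clampIdx_neg_natCast _ _ (by omega), pvWin_drop]
                congr 1
                omega
              have eSB2 : PySem.List.slice cs (some (max ((hi : Int) - gs.getD (j - 1) 0) ((min (lo + g0n + 1) hi : Nat) : Int))) (some (hi : Int)) = pvWin cs (max (hi - gln) (min (lo + g0n + 1) hi)) hi := by
                rw [hgl, show max ((hi : Int) - (gln : Int)) ((min (lo + g0n + 1) hi : Nat) : Int) = ((max (hi - gln) (min (lo + g0n + 1) hi) : Nat) : Int) by omega, PySem.List.slice_natCast]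
                rfl
              have eUA2 : PySem.List.slice (pvWin cs (min (lo + g0n + 1) hi) hi) none (some (-gs.getD (j - 1) 0 - 1)) = pvWin cs (min (lo + g0n + 1) hi) (max (hi - gln - 1) (min (lo + g0n + 1) hi)) := by
                rw [hgl, show (-(gln : Int) - 1) = (-((gln + 1 : Nat) : Int)) by omega, pvSliceTo, pvWin_len cs (min (lo + g0n + 1) hi) hi h2, PySem.List.clampIdx_neg_natCast _ _ (by omega), pvWin_take']
                congr 1
                omega
              have eUB2 : max ((hi : Int) - gs.getD (j - 1) 0 - 1) ((min (lo + g0n + 1) hi : Nat) : Int) = ((max (hi - gln - 1) (min (lo + g0n + 1) hi) : Nat) : Int) := by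
                rw [hgl]
                omega
              have eJB2 : (j : Int) - 1 = ((j - 1 : Nat) : Int) := by omega
              have eGA2 : (if 1 < (pvWin gs (i + 1) j).length then PySem.List.slice (pvWin gs (i + 1) j) none (some (-1)) else []) = pvWin gs (i + 1) (j - 1) := by
                rw [pvWin_len gs (i + 1) j h4]
                by_cases hj2 : 1 < j - (i + 1)
                · rw [if_pos hj2, PySem.List.slice_to_neg_one, List.dropLast_eq_take, pvWin_len gs (i + 1) j h4, pvWin_take']
                  congr 1
                  omega
                · rw [if_neg hj2]
                  unfold pvWin
                  rw [show j - 1 - (i + 1) = 0 by omega]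
                  simp
              simp only [e1', eSA2, eSB2, eUA2, eUB2, eJB2, eGA2]
              by_cases hc2 : (cs.getD (hi - 1) ' ' == '#' && (pvWin cs (max (hi - gln) (min (lo + g0n + 1) hi)) hi).all fun x => x == '?' || x == '#') = true
              · simp only [hc2, reduceIte]
                have hfinA : (pvWin cs (min (lo + g0n + 1) hi) (max (hi - gln - 1) (min (lo + g0n + 1) hi)) = [] ∨ pvWin gs (i + 1) (j - 1) = []) ↔ ((min (lo + g0n + 1) hi) = max (hi - gln - 1) (min (lo + g0n + 1) hi) ∨ (i + 1) = j - 1) := by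
                  rw [pvWin_nil cs (min (lo + g0n + 1) hi) _ (by omega) (by omega), pvWin_nil gs (i + 1) (j - 1) (by omega) (by omega)]
                by_cases hfin : (min (lo + g0n + 1) hi) = max (hi - gln - 1) (min (lo + g0n + 1) hi) ∨ (i + 1) = j - 1
                · rw [if_pos (hfinA.mpr hfin), pv_bstop cs gs f _ _ _ _ (by omega)]
                  exact ⟨(min (lo + g0n + 1) hi), max (hi - gln - 1) (min (lo + g0n + 1) hi), (i + 1), j - 1, rfl, by omega, by omega, by omega, by omega, rfl⟩
                · rw [if_neg (fun hcon => hfin (hfinA.mp hcon))]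
                  exact ih (min (lo + g0n + 1) hi) (max (hi - gln - 1) (min (lo + g0n + 1) hi)) (i + 1) (j - 1) (by omega) (by omega) (by omega) (by omega)
              · rw [Bool.not_eq_true] at hc2
                simp only [hc2, Bool.false_eq_true, if_false]
                rw [if_neg (fun hcon => hmid (hmidA.mp hcon))]
                exact ih (min (lo + g0n + 1) hi) hi (i + 1) j (by omega) h2 (by omega) h4
          · rw [Bool.not_eq_true] at hc1
            simp only [hc1, Bool.false_eq_true, if_false, Bool.false_or]
            rw [if_neg hBG, if_neg hA]
            have e1' := pvWin_pyGetDlast cs (lo) hi ' ' (by omega) h2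
            have eSA2 : PySem.List.slice (pvWin cs (lo) hi) (some (-gs.getD (j - 1) 0)) none = pvWin cs (max (hi - gln) (lo)) hi := by
              rw [hgl, PySem.List.slice_some_none, pvWin_len cs (lo) hi h2, PySem.List.clampIdx_neg_natCast _ _ (by omega), pvWin_drop]
              congr 1
              omega
            have eSB2 : PySem.List.slice cs (some (max ((hi : Int) - gs.getD (j - 1) 0) ((lo : Nat) : Int))) (some (hi : Int)) = pvWin cs (max (hi - gln) (lo)) hi := by
              rw [hgl, show max ((hi : Int) - (gln : Int)) ((lo : Nat) : Int) = ((max (hi - gln) (lo) : Nat) : Int) by omega, PySem.List.slice_natCast]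
              rfl
            have eUA2 : PySem.List.slice (pvWin cs (lo) hi) none (some (-gs.getD (j - 1) 0 - 1)) = pvWin cs (lo) (max (hi - gln - 1) (lo)) := by
              rw [hgl, show (-(gln : Int) - 1) = (-((gln + 1 : Nat) : Int)) by omega, pvSliceTo, pvWin_len cs (lo) hi h2, PySem.List.clampIdx_neg_natCast _ _ (by omega), pvWin_take']
              congr 1
              omega
            have eUB2 : max ((hi : Int) - gs.getD (j - 1) 0 - 1) ((lo : Nat) : Int) = ((max (hi - gln - 1) (lo) : Nat) : Int) := by
              rw [hgl]
              omega
            have eJB2 : (j : Int) - 1 = ((j - 1 : Nat) : Int) := by omega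
            have eGA2 : (if 1 < (pvWin gs (i) j).length then PySem.List.slice (pvWin gs (i) j) none (some (-1)) else []) = pvWin gs (i) (j - 1) := by
              rw [pvWin_len gs (i) j h4]
              by_cases hj2 : 1 < j - (i)
              · rw [if_pos hj2, PySem.List.slice_to_neg_one, List.dropLast_eq_take, pvWin_len gs (i) j h4, pvWin_take']
                congr 1
                omega
              · rw [if_neg hj2]
                unfold pvWin
                rw [show j - 1 - (i) = 0 by omega]
                simp
            simp only [e1', eSA2, eSB2, eUA2, eUB2, eJB2, eGA2]
            by_cases hc2 : (cs.getD (hi - 1) ' ' == '#' && (pvWin cs (max (hi - gln) (lo)) hi).all fun x => x == '?' || x == '#') = true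
            · simp only [hc2, reduceIte]
              have hfinA : (pvWin cs (lo) (max (hi - gln - 1) (lo)) = [] ∨ pvWin gs (i) (j - 1) = []) ↔ ((lo) = max (hi - gln - 1) (lo) ∨ (i) = j - 1) := by
                rw [pvWin_nil cs (lo) _ (by omega) (by omega), pvWin_nil gs (i) (j - 1) (by omega) (by omega)]
              by_cases hfin : (lo) = max (hi - gln - 1) (lo) ∨ (i) = j - 1
              · rw [if_pos (hfinA.mpr hfin), pv_bstop cs gs f _ _ _ _ (by omega)]
                exact ⟨(lo), max (hi - gln - 1) (lo), (i), j - 1, rfl, by omega, by omega, by omega, by omega, rfl⟩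
              · rw [if_neg (fun hcon => hfin (hfinA.mp hcon))]
                exact ih (lo) (max (hi - gln - 1) (lo)) (i) (j - 1) (by omega) (by omega) (by omega) (by omega)
            · rw [Bool.not_eq_true] at hc2
              simp only [hc2, Bool.false_eq_true, if_false]
              rw [if_neg hA]
              exact ⟨lo, hi, i, j, rfl, h1, h2, h3, h4, rfl⟩


-- dropWhile of a list whose first n elements satisfy p and whose n-th does not
theorem pv_dropWhile_drop {α : Type} (p : α → Bool) (d : α) :
    ∀ (xs : List α) (n : Nat), n < xs.length → (∀ k, k < n → p (xs.getD k d) = true) →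
      p (xs.getD n d) = false → xs.dropWhile p = xs.drop n := by
  intro xs
  induction xs with
  | nil =>
    intro n hn _ _
    simp at hn
  | cons x xs ih =>
    intro n hn hall hnf
    cases n with
    | zero =>
      have hx : p x = false := by simpa using hnf
      simp [hx]
    | succ n =>
      have hx : p x = true := by simpa using hall 0 (by omega)
      have hrec := ih n (by simpa using hn) (fun k hk => by simpa using hall (k + 1) (by omega)) (by simpa using hnf)
      simp [hx, hrec]

-- the second disjunct of Pre_: no '#' at either end of the dot-trimmed pattern,
-- so neither hit condition ever fires and both programs only strip dots
theorem pv_sim2 (cs : List Char) (gs : List Int)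
    (hF : (cs.dropWhile (fun c => c == '.')).head? ≠ some '#')
    (hB : (cs.reverse.dropWhile (fun c => c == '.')).head? ≠ some '#') :
    ∀ (f lo hi i j : Nat), lo ≤ hi → hi ≤ cs.length → i ≤ j → j ≤ gs.length →
      (∀ k, k < lo → cs.getD k ' ' = '.') → (∀ k, hi ≤ k → k < cs.length → cs.getD k ' ' = '.') →
      ∃ lo' hi' i' j' : Nat,
        bLoopF cs gs f lo hi i j = (((lo' : Int), (hi' : Int)), ((i' : Int), (j' : Int))) ∧
        lo' ≤ hi' ∧ hi' ≤ cs.length ∧ i' ≤ j' ∧ j' ≤ gs.length ∧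
        aLoopF f (pvWin cs lo hi) (pvWin gs i j) = (pvWin cs lo' hi', pvWin gs i' j') := by
  intro f
  induction f with
  | zero =>
    intro lo hi i j h1 h2 h3 h4 _ _
    exact ⟨lo, hi, i, j, rfl, h1, h2, h3, h4, rfl⟩
  | succ f ih =>
    intro lo hi i j h1 h2 h3 h4 hfr hbk
    by_cases hG : lo = hi ∨ i = j
    · have hBG : (hi : Int) ≤ (lo : Int) ∨ (j : Int) ≤ (i : Int) := by omega
      have hA : pvWin cs lo hi = [] ∨ pvWin gs i j = [] := by
        rcases hG with h | h
        · exact Or.inl ((pvWin_nil cs lo hi h1 h2).mpr h)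
        · exact Or.inr ((pvWin_nil gs i j h3 h4).mpr h)
      refine ⟨lo, hi, i, j, ?_, h1, h2, h3, h4, ?_⟩
      · simp only [bLoopF, if_pos hBG]
      · simp only [aLoopF, if_pos hA]
    · have hlo : lo < hi := by omega
      have hij : i < j := by omega
      have hBG : ¬((hi : Int) ≤ (lo : Int) ∨ (j : Int) ≤ (i : Int)) := by omega
      have hA : ¬(pvWin cs lo hi = [] ∨ pvWin gs i j = []) := by
        rw [pvWin_nil cs lo hi h1 h2, pvWin_nil gs i j h3 h4]
        omega
      have e0 := pvWin_pyGetD0 cs lo hi ' ' hlo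
      have e1 := pvWin_pyGetDlast cs lo hi ' ' hlo h2
      have e2 := pvWin_pyGetD0 gs i j 0 hij
      have e3 := pvWin_pyGetDlast gs i j 0 hij h4
      have eb0 : PySem.List.pyGetD cs (lo : Int) ' ' = cs.getD lo ' ' := by simp
      have eb1 : PySem.List.pyGetD cs ((hi : Int) - 1) ' ' = cs.getD (hi - 1) ' ' := by
        rw [show ((hi : Int) - 1) = ((hi - 1 : Nat) : Int) by omega]
        simp
      have eb2 : PySem.List.pyGetD gs (i : Int) 0 = gs.getD i 0 := by simp
      have eb3 : PySem.List.pyGetD gs ((j : Int) - 1) 0 = gs.getD (j - 1) 0 := by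
        rw [show ((j : Int) - 1) = ((j - 1 : Nat) : Int) by omega]
        simp
      simp only [aLoopF, bLoopF, if_neg hA, if_neg hBG, e0, e1, e2, e3, eb0, eb1, eb2, eb3]
      by_cases hd1 : cs.getD lo ' ' = '.'
      · simp only [if_pos hd1]
        have hsl : PySem.List.slice (pvWin cs lo hi) (some 1) none = pvWin cs (lo + 1) hi := by
          rw [PySem.List.slice_from_one, ← List.drop_one, pvWin_drop]
        rw [hsl, show ((lo : Int) + 1) = ((lo + 1 : Nat) : Int) by omega]
        refine ih (lo + 1) hi i j (by omega) h2 h3 h4 ?_ hbk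
        intro k hk
        rcases (show k < lo ∨ k = lo by omega) with h | h
        · exact hfr k h
        · subst h
          exact hd1
      · by_cases hd2 : cs.getD (hi - 1) ' ' = '.'
        · simp only [if_neg hd1, if_pos hd2]
          have hsl : PySem.List.slice (pvWin cs lo hi) none (some (-1)) = pvWin cs lo (hi - 1) := by
            rw [PySem.List.slice_to_neg_one, List.dropLast_eq_take, pvWin_len cs lo hi h2, pvWin_take']
            congr 1
            omega
          rw [hsl, show ((hi : Int) - 1) = ((hi - 1 : Nat) : Int) by omega]
          refine ih lo (hi - 1) i j (by omega) (by omega) h3 h4 hfr ?_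
          intro k hk1 hk2
          rcases (show k = hi - 1 ∨ hi ≤ k by omega) with h | h
          · subst h
            exact hd2
          · exact hbk k h hk2
        · simp only [if_neg hd1, if_neg hd2]
          have hlen0 : lo < cs.length := by omega
          have hgetl : cs[lo]? = some (cs.getD lo ' ') := by
            simp [List.getD_eq_getElem?_getD, List.getElem?_eq_getElem hlen0]
          have hdf : cs.dropWhile (fun c => c == '.') = cs.drop lo := by
            apply pv_dropWhile_drop (fun c => c == '.') ' ' cs lo hlen0
            · intro k hk
              show (cs.getD k ' ' == '.') = true
              rw [hfr k hk]
              rfl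
            · show (cs.getD lo ' ' == '.') = false
              exact beq_eq_false_iff_ne.mpr hd1
          have hne1 : cs.getD lo ' ' ≠ '#' := by
            intro hcon
            apply hF
            rw [hdf, List.head?_drop, hgetl, hcon]
          have hrev : ∀ k, k < cs.length → cs.reverse.getD k ' ' = cs.getD (cs.length - 1 - k) ' ' := by
            intro k hk
            rw [List.getD_eq_getElem?_getD, List.getD_eq_getElem?_getD, List.getElem?_reverse hk]
          have hlenr : cs.length - hi < cs.reverse.length := by
            rw [List.length_reverse]
            omega
          have hdb : cs.reverse.dropWhile (fun c => c == '.') = cs.reverse.drop (cs.length - hi) := by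
            apply pv_dropWhile_drop (fun c => c == '.') ' ' cs.reverse (cs.length - hi) hlenr
            · intro k hk
              show (cs.reverse.getD k ' ' == '.') = true
              rw [hrev k (by omega), hbk (cs.length - 1 - k) (by omega) (by omega)]
              rfl
            · show (cs.reverse.getD (cs.length - hi) ' ' == '.') = false
              rw [hrev (cs.length - hi) (by omega), show cs.length - 1 - (cs.length - hi) = hi - 1 by omega]
              exact beq_eq_false_iff_ne.mpr hd2
          have hgetr : cs.reverse[cs.length - hi]? = some (cs.getD (hi - 1) ' ') := by
            rw [List.getElem?_reverse (by omega), show cs.length - 1 - (cs.length - hi) = hi - 1 by omega]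
            simp [List.getD_eq_getElem?_getD, List.getElem?_eq_getElem (show hi - 1 < cs.length by omega)]
          have hne2 : cs.getD (hi - 1) ' ' ≠ '#' := by
            intro hcon
            apply hB
            rw [hdb, List.head?_drop, hgetr, hcon]
          have hb1 : (cs.getD lo ' ' == '#') = false := beq_eq_false_iff_ne.mpr hne1
          have hb2 : (cs.getD (hi - 1) ' ' == '#') = false := beq_eq_false_iff_ne.mpr hne2
          simp only [hb1, Bool.false_and, Bool.false_eq_true, if_false]
          rw [if_neg hBG, if_neg hA]
          simp only [e1, hb2, Bool.false_and, Bool.false_or, Bool.false_eq_true, if_false]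
          rw [if_neg hA]
          exact ⟨lo, hi, i, j, rfl, h1, h2, h3, h4, rfl⟩

-- ===== VERDICT (by name: the statement is the Claim_ definition above) =====
theorem strip_ends_spec : Claim_equal_strip_ends := by
  unfold Claim_equal_strip_ends Spec_strip_ends
  intro pattern groups _ hpre
  have key :
      ∃ lo' hi' i' j' : Nat,
        bLoopF pattern.toList groups (pattern.toList.length + groups.length + 1)
            ((0 : Nat) : Int) (pattern.toList.length : Int) ((0 : Nat) : Int) (groups.length : Int) =
          (((lo' : Int), (hi' : Int)), ((i' : Int), (j' : Int))) ∧
        lo' ≤ hi' ∧ hi' ≤ pattern.toList.length ∧ i' ≤ j' ∧ j' ≤ groups.length ∧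
        aLoopF (pattern.toList.length + groups.length + 1)
            (pvWin pattern.toList 0 pattern.toList.length) (pvWin groups 0 groups.length) =
          (pvWin pattern.toList lo' hi', pvWin groups i' j') := by
    rcases hpre with hg | ⟨hf, hbk⟩
    · exact pv_sim pattern.toList groups hg (pattern.toList.length + groups.length + 1)
        0 pattern.toList.length 0 groups.length (by omega) (le_refl _) (by omega) (le_refl _)
    · exact pv_sim2 pattern.toList groups hf hbk (pattern.toList.length + groups.length + 1)
        0 pattern.toList.length 0 groups.length (by omega) (le_refl _) (by omega) (le_refl _)
        (fun k hk => absurd hk (by omega)) (fun k hk1 hk2 => absurd hk1 (by omega))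
  obtain ⟨lo', hi', i', j', hb, hlh, hhc, hij, hjg, ha⟩ := key
  have hw1 : pvWin pattern.toList 0 pattern.toList.length = pattern.toList := by
    simp [pvWin]
  have hw2 : pvWin groups 0 groups.length = groups := by
    simp [pvWin]
  rw [hw1, hw2] at ha
  simp only [Nat.cast_zero] at hb
  simp only [strip_ends, strip_ends_alt, ha, hb, PySem.List.slice_natCast]
  rfl
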